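-- pv_equiv track=rewrite | github.com/pypi-data/pypi-mirror-322 | packages/pyrcmclient/pyrcmclient-0.0.13-py3-none-any.whl/i4srcm/xml/DBPath.py | is_tag_id_list
-- ===== SOURCE A (Python) =====
-- def is_tag_id_list(tag_id_list:str|None) -> str|None:
--     if tag_id_list:
--         for char in tag_id_list:
--             if not (char.isdigit() or char in " ,|"):
--                 return None
--         numbers = sorted(set(int(x) for x in tag_id_list.replace(",", " ").replace("|", " ").split() if x.isdigit()))
--         return ",".join(map(str, numbers))
--     return None
-- ===== SOURCE B (Python) =====
-- def is_tag_id_list(tag_id_list):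
--     if not tag_id_list:
--         return None
--     nums = set()
--     buf = ""
--     for ch in tag_id_list:
--         if ch.isdigit():
--             buf += ch
--         elif ch in " ,|":
--             if buf:
--                 nums.add(int(buf))
--                 buf = ""
--         else:
--             return None
--     if buf:
--         nums.add(int(buf))
--     return ",".join(map(str, sorted(nums)))
-- ===== Notes on version B (the rewrite author's own statement) =====
-- stated objective: alternative
-- what changed: B replaces A's separate validation loop plus replace/replace/split/filter tokenization with a single streaming pass that buffers digit runs and flushes them into the set.
import Mathlib
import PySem

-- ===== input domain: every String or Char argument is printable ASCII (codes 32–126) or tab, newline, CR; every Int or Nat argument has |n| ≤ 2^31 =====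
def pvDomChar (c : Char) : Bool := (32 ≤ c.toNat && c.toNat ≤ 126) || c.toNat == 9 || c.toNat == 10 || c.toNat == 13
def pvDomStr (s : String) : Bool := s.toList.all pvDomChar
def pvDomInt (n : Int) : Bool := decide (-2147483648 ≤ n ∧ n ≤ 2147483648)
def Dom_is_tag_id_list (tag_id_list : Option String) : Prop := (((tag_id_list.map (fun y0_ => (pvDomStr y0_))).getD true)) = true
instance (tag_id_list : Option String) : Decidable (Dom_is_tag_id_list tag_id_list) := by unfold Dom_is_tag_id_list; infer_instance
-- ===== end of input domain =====

-- B fuses A's separate validation loop and replace/replace/split tokenization into one streaming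
-- pass with a digit buffer (alternative decomposition, same asymptotic cost).

-- ===== PORT A =====
-- int(x): every token either Python converts is a nonempty digit string, so int() never raises;
-- the getD 0 default is unreachable.
def pyIntOf (cs : List Char) : Int := (PySem.Int.ofChars? cs).getD 0

-- the 'for char in tag_id_list: if not (char.isdigit() or char in " ,|"): return None' loop
-- (the string literal " ,|" is written as its character list [' ', ',', '|'])
def aCheck : List Char → Bool
  | [] => true
  | c :: rest =>
    if !(PySem.Chars.isdigit c || PySem.Chars.isIn [c] [' ', ',', '|']) then false else aCheck rest

def is_tag_id_list (tag_id_list : Option String) : Option String :=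
  match tag_id_list with
  | none => none
  | some s =>
    if s.toList ≠ [] then
      if aCheck s.toList then
        let numbers :=
          PySem.List.sorted
            (PySem.Set.ofList
              (((PySem.Chars.split₀
                    (PySem.Chars.replace (PySem.Chars.replace s.toList [','] [' ']) ['|'] [' '])).filter
                  (fun x => PySem.Chars.strIsdigit x)).map pyIntOf))
            (fun x => x) false
        some (PySem.Str.join "," (numbers.map PySem.Int.toStr))
      else none
    else none

-- ===== PORT B =====
-- the streaming loop of Source B: a digit extends the buffer, a separator flushes it into the set,
-- anything else is 'return None' (modelled as none)
def bGo : List Char → List Char → PySem.Set Int → Option (List Char × PySem.Set Int)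
  | [], buf, nums => some (buf, nums)
  | c :: rest, buf, nums =>
    if PySem.Chars.isdigit c then bGo rest (buf ++ [c]) nums
    else if PySem.Chars.isIn [c] [' ', ',', '|'] then
      if buf ≠ [] then bGo rest [] (PySem.Set.add nums (pyIntOf buf)) else bGo rest buf nums
    else none

def is_tag_id_list_alt (tag_id_list : Option String) : Option String :=
  match tag_id_list with
  | none => none
  | some s =>
    if s.toList = [] then none
    else
      match bGo s.toList [] PySem.Set.empty with
      | none => none
      | some (buf, nums) =>
        let final := if buf ≠ [] then PySem.Set.add nums (pyIntOf buf) else nums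
        some (PySem.Str.join "," ((PySem.List.sorted final (fun x => x) false).map PySem.Int.toStr))

-- ===== PRECONDITION & SPEC =====
def Spec_is_tag_id_list (tag_id_list : Option String) (out : Option String) : Prop := out = is_tag_id_list_alt tag_id_list
instance (tag_id_list : Option String) (out : Option String) : Decidable (Spec_is_tag_id_list tag_id_list out) := by unfold Spec_is_tag_id_list; infer_instance

-- ===== CLAIM (what is proved, stated in full; the proofs are below) =====
def Claim_equal_is_tag_id_list : Prop := ∀ (tag_id_list : Option String), Dom_is_tag_id_list tag_id_list → Spec_is_tag_id_list tag_id_list (is_tag_id_list tag_id_list)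

-- ===== LEMMAS AND PROOFS =====

-- reference tokenizer: the maximal digit runs of the string, with a carried buffer
def runs : List Char → List Char → List (List Char)
  | [], buf => if buf = [] then [] else [buf]
  | c :: rest, buf =>
    if PySem.Chars.isdigit c then runs rest (buf ++ [c])
    else if buf = [] then runs rest [] else buf :: runs rest []

-- a char A's validation loop accepts
def okChar (c : Char) : Bool := PySem.Chars.isdigit c || PySem.Chars.isIn [c] [' ', ',', '|']

theorem isspace_of_digit (c : Char) (h : PySem.Chars.isdigit c = true) : PySem.Chars.isspace c = false := by
  simp only [PySem.Chars.isdigit, Bool.and_eq_true, decide_eq_true_eq, Char.le_def,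
    UInt32.le_iff_toNat_le] at h
  have e0 : ('0').val.toNat = 48 := rfl
  have e9 : ('9').val.toNat = 57 := rfl
  rw [e0, e9] at h
  simp only [PySem.Chars.isspace, Bool.or_eq_false_iff, Bool.and_eq_false_iff,
    decide_eq_false_iff_not, Char.toNat]
  omega

theorem isIn_singleton_eq (c : Char) (l : List Char) : PySem.Chars.isIn [c] l = l.contains c := by
  rcases h : l.contains c with _|_
  · rw [PySem.Chars.isIn_eq_false_iff]
    intro hi; simp [List.contains_eq_mem] at h
    exact h (List.singleton_sublist.mp hi.sublist)
  · rw [PySem.Chars.isIn_iff_infix]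
    simp [List.contains_eq_mem] at h
    obtain ⟨a, b, rfl⟩ := List.mem_iff_append.mp h; exact ⟨a, b, by simp⟩

theorem replace_go_single (o n : Char) :
    ∀ (fuel : Nat) (l acc : List Char), l.length ≤ fuel →
    PySem.Chars.replace.go [o] [n] fuel l acc = acc.reverse ++ l.map (fun c => if c = o then n else c) := by
  intro fuel
  induction fuel with
  | zero => intro l acc h; simp at h; simp [h, PySem.Chars.replace.go]
  | succ k ih =>
    intro l acc h
    cases l with
    | nil => simp [PySem.Chars.replace.go]
    | cons c t =>
      rw [PySem.Chars.replace.go]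
      by_cases hc : c = o
      · subst hc
        simp only [List.isPrefixOf, beq_self_eq_true, Bool.true_and, if_pos, List.length_cons,
          List.length_nil, List.drop_succ_cons, List.drop_zero, List.reverse_cons, List.reverse_nil,
          List.nil_append, List.singleton_append]
        rw [ih t (n :: acc) (by simpa using h)]
        simp
      · simp only [List.isPrefixOf, Bool.and_true]
        rw [if_neg (by simp [Ne.symm hc])]
        rw [ih t (c :: acc) (by simpa using h)]
        simp [hc]

theorem replace_single (o n : Char) (cs : List Char) :
    PySem.Chars.replace cs [o] [n] = cs.map (fun c => if c = o then n else c) := by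
  rw [PySem.Chars.replace]
  simp [replace_go_single o n cs.length cs [] le_rfl]


theorem split₀_go_runs : ∀ (cs cur : List Char) (acc : List (List Char)),
    (∀ c ∈ cs, PySem.Chars.isdigit c = true ∨ c = ' ') →
    PySem.Chars.split₀.go cs cur acc = acc.reverse ++ runs cs cur.reverse := by
  intro cs
  induction cs with
  | nil =>
    intro cur acc _
    rw [PySem.Chars.split₀.go.eq_def]
    dsimp only
    rw [runs]
    by_cases hc : cur = []
    · simp [hc]
    · rw [if_neg (by simpa using hc), if_neg (by simpa [List.reverse_eq_nil_iff] using hc)]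
      simp
  | cons c rest ih =>
    intro cur acc h
    rw [PySem.Chars.split₀.go.eq_def]
    dsimp only
    rw [runs]
    rcases h c (by simp) with hd | hsp
    · rw [if_neg (by simp [isspace_of_digit c hd]), if_pos hd,
        ih (c :: cur) acc (fun x hx => h x (by simp [hx]))]
      simp
    · subst hsp
      rw [show PySem.Chars.isspace ' ' = true from by decide]
      rw [show PySem.Chars.isdigit ' ' = false from by decide]
      by_cases hc : cur = []
      · subst hc
        simp only [List.isEmpty_nil, if_true, Bool.false_eq_true, if_false, List.reverse_nil]
        rw [ih [] acc (fun x hx => h x (by simp [hx]))]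
        simp
      · have hne : cur.isEmpty = false := by simpa [List.isEmpty_iff] using hc
        simp only [hne, Bool.false_eq_true, if_false, if_true]
        rw [ih [] (cur.reverse :: acc) (fun x hx => h x (by simp [hx]))]
        simp [List.reverse_eq_nil_iff, hc]

theorem split₀_runs (cs : List Char) (h : ∀ c ∈ cs, PySem.Chars.isdigit c = true ∨ c = ' ') :
    PySem.Chars.split₀ cs = runs cs [] := by
  rw [PySem.Chars.split₀, split₀_go_runs cs [] [] h]; rfl

theorem runs_map_subst (cs : List Char) (buf : List Char) :
    runs (cs.map (fun c => if (if c = ',' then ' ' else c) = '|' then ' ' else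
                           (if c = ',' then ' ' else c))) buf = runs cs buf := by
  induction cs generalizing buf with
  | nil => rfl
  | cons c rest ih =>
    show runs (_ :: _) buf = _
    rw [runs, runs]
    have hsp : PySem.Chars.isdigit ' ' = false := by decide
    by_cases h1 : c = ','
    · subst h1
      simp [hsp, show PySem.Chars.isdigit ',' = false from by decide, ih]
    · by_cases h2 : c = '|'
      · subst h2
        simp [h1, hsp, show PySem.Chars.isdigit '|' = false from by decide, ih]
      · simp only [if_neg h1, if_neg h2, ih]

theorem runs_digit (cs : List Char) (buf : List Char) (hb : buf.all PySem.Chars.isdigit = true) :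
    ∀ x ∈ runs cs buf, x ≠ [] ∧ x.all PySem.Chars.isdigit = true := by
  induction cs generalizing buf with
  | nil =>
    intro x hx
    rw [runs] at hx
    by_cases hc : buf = []
    · simp [hc] at hx
    · rw [if_neg hc] at hx
      simp at hx
      subst hx; exact ⟨hc, hb⟩
  | cons c rest ih =>
    intro x hx
    rw [runs] at hx
    by_cases hd : PySem.Chars.isdigit c = true
    · rw [if_pos hd] at hx
      exact ih (buf ++ [c]) (by simp_all) x hx
    · rw [if_neg hd] at hx
      by_cases hc : buf = []
      · rw [if_pos hc] at hx
        exact ih [] (by simp) x hx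
      · rw [if_neg hc] at hx
        rcases List.mem_cons.mp hx with rfl | hx'
        · exact ⟨hc, hb⟩
        · exact ih [] (by simp) x hx'
theorem bGo_valid (cs : List Char) : ∀ (buf : List Char) (nums : PySem.Set Int),
    (∀ c ∈ cs, okChar c = true) →
    Option.map (fun p : List Char × PySem.Set Int =>
        if p.1 ≠ [] then PySem.Set.add p.2 (pyIntOf p.1) else p.2) (bGo cs buf nums)
      = some (((runs cs buf).map pyIntOf).foldl PySem.Set.add nums) := by
  induction cs with
  | nil =>
    intro buf nums _
    rw [bGo, runs]
    by_cases hb : buf = [] <;> simp [hb]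
  | cons c rest ih =>
    intro buf nums h
    rw [bGo, runs]
    by_cases hd : PySem.Chars.isdigit c = true
    · rw [if_pos hd, if_pos hd, ih _ _ (fun x hx => h x (by simp [hx]))]
    · rw [if_neg hd, if_neg hd]
      have hsep : PySem.Chars.isIn [c] [' ', ',', '|'] = true := by
        rcases Bool.or_eq_true_iff.mp (h c (by simp)) with h' | h'
        · exact absurd h' hd
        · exact h'
      rw [if_pos hsep]
      by_cases hb : buf = []
      · rw [if_neg (by simpa using hb), if_pos hb, hb, ih _ _ (fun x hx => h x (by simp [hx]))]
      · rw [if_pos hb, if_neg hb, ih _ _ (fun x hx => h x (by simp [hx]))]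
        simp

theorem bGo_invalid (cs : List Char) : ∀ (buf : List Char) (nums : PySem.Set Int),
    ¬ (∀ c ∈ cs, okChar c = true) → bGo cs buf nums = none := by
  induction cs with
  | nil => intro _ _ h; exact absurd (by simp) h
  | cons c rest ih =>
    intro buf nums h
    rw [bGo]
    by_cases hc : okChar c = true
    · have hr : ¬ ∀ x ∈ rest, okChar x = true := fun hr => h (by
        intro x hx; rcases List.mem_cons.mp hx with rfl | hx'
        · exact hc
        · exact hr x hx')
      by_cases hd : PySem.Chars.isdigit c = true
      · rw [if_pos hd]; exact ih _ _ hr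
      · rw [if_neg hd]
        have hsep : PySem.Chars.isIn [c] [' ', ',', '|'] = true := by
          rcases Bool.or_eq_true_iff.mp hc with h' | h'
          · exact absurd h' hd
          · exact h'
        rw [if_pos hsep]
        by_cases hb : buf = []
        · rw [if_neg (by simpa using hb)]; exact ih _ _ hr
        · rw [if_pos hb]; exact ih _ _ hr
    · rw [if_neg (fun hd => hc (Bool.or_eq_true_iff.mpr (Or.inl hd))),
        if_neg (fun hs => hc (Bool.or_eq_true_iff.mpr (Or.inr hs)))]
theorem aCheck_eq_all (cs : List Char) : aCheck cs = cs.all okChar := by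
  induction cs with
  | nil => rfl
  | cons c rest ih =>
    rw [aCheck, List.all_cons]
    cases hc : (PySem.Chars.isdigit c || PySem.Chars.isIn [c] [' ', ',', '|'])
    · simp [okChar, hc]
    · simp [okChar, hc, ih]

-- ===== VERDICT (by name: the statement is the Claim_ definition above) =====
theorem is_tag_id_list_spec : Claim_equal_is_tag_id_list := by
  intro t _
  unfold Spec_is_tag_id_list
  match t with
  | none => rfl
  | some s =>
    rw [is_tag_id_list, is_tag_id_list_alt]
    by_cases he : s.toList = []
    · simp [he]
    · rw [if_pos (by simpa using he), if_neg he]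
      by_cases hall : ∀ c ∈ s.toList, okChar c = true
      · rw [if_pos (by rw [aCheck_eq_all]; exact List.all_eq_true.mpr hall)]
        -- B side
        have hB := bGo_valid s.toList [] PySem.Set.empty hall
        obtain ⟨p, hp, hflush⟩ : ∃ p, bGo s.toList [] PySem.Set.empty = some p ∧
            (if p.1 = [] then p.2 else PySem.Set.add p.2 (pyIntOf p.1))
              = ((runs s.toList []).map pyIntOf).foldl PySem.Set.add [] := by
          cases hg : bGo s.toList [] PySem.Set.empty with
          | none => rw [hg] at hB; simp at hB
          | some p => rw [hg] at hB; simp at hB; exact ⟨p, rfl, hB⟩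
        rw [hp]
        -- A side tokenization
        rw [replace_single, replace_single, List.map_map]
        have hcomp : ((fun c => if c = '|' then ' ' else c) ∘ fun c => if c = ',' then ' ' else c)
            = (fun c => if (if c = ',' then ' ' else c) = '|' then ' ' else
                (if c = ',' then ' ' else c)) := rfl
        rw [hcomp]
        have hmapped : ∀ c ∈ s.toList.map (fun c => if (if c = ',' then ' ' else c) = '|' then ' '
            else (if c = ',' then ' ' else c)), PySem.Chars.isdigit c = true ∨ c = ' ' := by
          intro c' hc'
          obtain ⟨c, hc, rfl⟩ := List.mem_map.mp hc'
          have hok := hall c hc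
          rw [okChar, Bool.or_eq_true_iff] at hok
          rcases hok with hd | hs
          · left
            have h1 : c ≠ ',' := fun h => by rw [h] at hd; exact absurd hd (by decide)
            have h2 : c ≠ '|' := fun h => by rw [h] at hd; exact absurd hd (by decide)
            simpa [h1, h2] using hd
          · rw [isIn_singleton_eq] at hs
            simp [List.contains_eq_mem] at hs
            rcases hs with rfl | rfl | rfl <;> simp
        rw [split₀_runs _ hmapped, runs_map_subst]
        have hfilt : (runs s.toList []).filter (fun x => PySem.Chars.strIsdigit x)
            = runs s.toList [] := by
          apply List.filter_eq_self.mpr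
          intro x hx
          obtain ⟨hne, hdig⟩ := runs_digit s.toList [] (by simp) x hx
          simp [PySem.Chars.strIsdigit, hne, hdig]
        rw [hfilt]
        rcases p with ⟨buf, nums⟩
        have hset : PySem.Set.ofList ((runs s.toList []).map pyIntOf)
            = (if buf ≠ [] then PySem.Set.add nums (pyIntOf buf) else nums) := by
          rw [PySem.Set.ofList_eq_foldl]
          by_cases hb : buf = [] <;> simp [hb] at hflush ⊢ <;> exact hflush.symm
        show some _ = some _
        rw [hset]
      · rw [if_neg (by rw [aCheck_eq_all]; simpa using hall),
          bGo_invalid s.toList [] PySem.Set.empty hall]
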